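-- pv_equiv track=rewrite | github.com/rahelgerson94/ece479 | ece479_project/TSP.py | truncateTuple
-- ===== SOURCE A (Python) =====
-- def truncateTuple( tupl, goal):
--     tmp = []
--     for node in tupl:
--         if node != goal:
--             tmp.append(node)
--         else:
--             tmp.append(node)
--             break
--     return tuple(tmp)
-- ===== SOURCE B (Python) =====
-- def truncateTuple(tupl, goal):
--     idx = next((i for i, n in enumerate(tupl) if n == goal), None)
--     if idx is None:
--         return tuple(tupl)
--     return tuple(tupl[:idx + 1])
-- ===== Notes on version B (the rewrite author's own statement) =====
-- stated objective: simpler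
-- what changed: Replaces the element-by-element accumulate-and-break loop with a find-first-index-then-slice decomposition (next over enumerate, then tupl[:idx+1]).
import Mathlib
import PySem

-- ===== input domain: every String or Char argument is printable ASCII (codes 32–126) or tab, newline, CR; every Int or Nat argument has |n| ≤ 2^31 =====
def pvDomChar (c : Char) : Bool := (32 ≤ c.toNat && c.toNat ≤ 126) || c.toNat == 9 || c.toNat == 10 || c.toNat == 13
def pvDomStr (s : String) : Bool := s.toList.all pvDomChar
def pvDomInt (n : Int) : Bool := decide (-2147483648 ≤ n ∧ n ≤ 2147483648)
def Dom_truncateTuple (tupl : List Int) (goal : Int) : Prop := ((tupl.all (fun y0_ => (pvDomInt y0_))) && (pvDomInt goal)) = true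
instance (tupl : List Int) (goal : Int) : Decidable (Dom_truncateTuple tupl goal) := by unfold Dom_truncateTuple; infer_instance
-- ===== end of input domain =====

-- B replaces A's accumulate-and-break loop with find-first-index-then-slice (simpler decomposition, same cost).
-- ===== PORT A =====
-- A's loop: append each node; on the first node equal to goal, append it and break.
def truncLoopA (goal : Int) : List Int → List Int → List Int
  | [], tmp => tmp
  | n :: rest, tmp =>
      if n ≠ goal then truncLoopA goal rest (tmp ++ [n])
      else tmp ++ [n]

def truncateTuple (tupl : List Int) (goal : Int) : List Int :=
  truncLoopA goal tupl []

-- ===== PORT B =====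
-- next((i for i, n in enumerate(tupl) if n == goal), None)
def firstIdxB (goal : Int) : List Int → Nat → Option Nat
  | [], _ => none
  | n :: rest, i => if n == goal then some i else firstIdxB goal rest (i + 1)

def truncateTuple_alt (tupl : List Int) (goal : Int) : List Int :=
  match firstIdxB goal tupl 0 with
  | none => tupl
  | some i => tupl.take (i + 1)

-- ===== PRECONDITION & SPEC =====
def Spec_truncateTuple (tupl : List Int) (goal : Int) (out : List Int) : Prop := out = truncateTuple_alt tupl goal
instance (tupl : List Int) (goal : Int) (out : List Int) : Decidable (Spec_truncateTuple tupl goal out) := by unfold Spec_truncateTuple; infer_instance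

-- ===== CLAIM (what is proved, stated in full; the proofs are below) =====
def Claim_equal_truncateTuple : Prop := ∀ (tupl : List Int) (goal : Int), Dom_truncateTuple tupl goal → Spec_truncateTuple tupl goal (truncateTuple tupl goal)

-- ===== LEMMAS AND PROOFS =====

-- ===== VERDICT (by name: the statement is the Claim_ definition above) =====
theorem firstIdxB_shift (goal : Int) (l : List Int) (i : Nat) :
    firstIdxB goal l (i + 1) = (firstIdxB goal l i).map (· + 1) := by
  induction l generalizing i with
  | nil => simp [firstIdxB]
  | cons n rest ih =>
      by_cases h : n == goal
      · simp [firstIdxB, h]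
      · simp [firstIdxB, h, ih]

theorem alt_cons (goal n : Int) (rest : List Int) :
    truncateTuple_alt (n :: rest) goal =
      if n = goal then [n] else n :: truncateTuple_alt rest goal := by
  by_cases h : n = goal
  · simp [truncateTuple_alt, firstIdxB, h]
  · simp only [truncateTuple_alt, firstIdxB, beq_iff_eq, h, if_false, if_neg h]
    rw [firstIdxB_shift]
    cases firstIdxB goal rest 0 <;> simp

theorem loopA_eq (goal : Int) (l : List Int) (tmp : List Int) :
    truncLoopA goal l tmp = tmp ++ truncateTuple_alt l goal := by
  induction l generalizing tmp with
  | nil => simp [truncLoopA, truncateTuple_alt, firstIdxB]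
  | cons n rest ih =>
      rw [alt_cons]
      by_cases h : n = goal
      · simp [truncLoopA, h]
      · simp [truncLoopA, h, ih]

theorem truncateTuple_spec : Claim_equal_truncateTuple := by
  intro tupl goal _
  unfold Spec_truncateTuple truncateTuple
  rw [loopA_eq]
  simp
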